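-- pv_equiv track=rewrite | github.com/thierry-martinez/sendfile | src/sendfile.py | parse_options_header
-- ===== SOURCE A (Python) =====
-- def parse_options_header(header):
--     try:
--         semicolon = header.index(";")
--         content_type = header[0:semicolon]
--     except ValueError:
--         content_type = header
--         semicolon = len(header)
--     content_type = content_type.lower().strip()
--     options = {}
--     while 1:
--         try:
--             equal = header.index("=", semicolon + 1)
--         except ValueError:
--             break
--         option = header[semicolon + 1:equal].lower().strip()
--         position = equal + 1
--         while header[position:position + 1] == " ":
--             position += 1
--         if header[position:position + 1] == "\"":
--             value = ""
--             position += 1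
--             try:
--                 while header[position] != "\"":
--                     if header[position] == "\\":
--                         value += header[position + 1]
--                         position += 2
--                     else:
--                         value += header[position]
--                         position += 1
--                 position += 1
--                 while header[position:position + 1] == " ":
--                     position += 1
--                 if position == len(header):
--                     semicolon = len(header)
--                 elif header[position] == ";":
--                     semicolon = position
--                 else:
--                     break
--             except IndexError:
--                 break
--         else:
--             try:
--                 semicolon = header.index(";", position)
--                 value = header[position:semicolon]
--             except ValueError:
--                 value = header[position:]
--                 semicolon = len(header)
--         options[option] = value
--     return content_type, options
-- ===== SOURCE B (Python) =====
-- def parse_options_header(header):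
--     # Character-at-a-time state machine (a fold over the header's tail),
--     # instead of exception-driven index() jumps.
--     sem = header.find(";")
--     if sem < 0:
--         content_type = header.lower().strip()
--         rest = ""
--     else:
--         content_type = header[:sem].lower().strip()
--         rest = header[sem + 1:]
--     options = {}
--     state = "name"   # name | pre | unquoted | quoted | escape | afterq
--     name = ""
--     buf = ""
--     for c in rest:
--         if state == "name":
--             if c == "=":
--                 name = buf.lower().strip()
--                 buf = ""
--                 state = "pre"
--             else:
--                 buf += c
--         elif state == "pre":
--             if c == " ":
--                 pass
--             elif c == '"':
--                 state = "quoted"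
--             elif c == ";":
--                 options[name] = ""
--                 buf = ""
--                 state = "name"
--             else:
--                 buf = c
--                 state = "unquoted"
--         elif state == "unquoted":
--             if c == ";":
--                 options[name] = buf
--                 buf = ""
--                 state = "name"
--             else:
--                 buf += c
--         elif state == "quoted":
--             if c == '"':
--                 state = "afterq"
--             elif c == "\\":
--                 state = "escape"
--             else:
--                 buf += c
--         elif state == "escape":
--             buf += c
--             state = "quoted"
--         else:  # afterq
--             if c == " ":
--                 pass
--             elif c == ";":
--                 options[name] = buf
--                 buf = ""
--                 state = "name"
--             else:
--                 return content_type, options  # junk after closing quote: stop, no store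
--     if state in ("pre", "unquoted", "afterq"):
--         options[name] = buf
--     return content_type, options
-- ===== Notes on version B (the rewrite author's own statement) =====
-- stated objective: alternative
-- what changed: Replaces A's exception-driven str.index() jumps and ad-hoc inner loops by a six-state character-at-a-time state machine (name/pre/unquoted/quoted/escape/afterq) folded once over the header tail, carrying (state, name, buffer) and emitting each option as its state completes.
import Mathlib
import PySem

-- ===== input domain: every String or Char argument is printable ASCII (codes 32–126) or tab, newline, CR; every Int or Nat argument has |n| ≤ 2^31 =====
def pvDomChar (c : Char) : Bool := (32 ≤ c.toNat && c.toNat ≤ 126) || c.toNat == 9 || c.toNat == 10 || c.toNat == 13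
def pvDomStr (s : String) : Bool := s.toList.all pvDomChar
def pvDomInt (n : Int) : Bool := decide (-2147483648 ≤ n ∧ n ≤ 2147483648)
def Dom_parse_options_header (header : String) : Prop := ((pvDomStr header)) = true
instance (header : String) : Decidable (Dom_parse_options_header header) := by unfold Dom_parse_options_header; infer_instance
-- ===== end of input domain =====

-- B replaces A's exception-driven .index() jumps by a six-state character-at-a-time state
-- machine folded over the header tail (same result; objective: alternative, no speed claim).

-- ===== PORT A =====

-- needed by qloopA's termination proof
theorem pvA_pyGet_lt (hs : List Char) (p : Nat) (c : Char)
    (h : PySem.List.pyGet? hs (p : Int) = some c) : p < hs.length := by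
  rw [PySem.List.pyGet?_natCast] at h
  exact (List.getElem?_eq_some_iff.mp h).1

-- needed by skipA's termination proof (and the equivalence proof)
theorem pvA_slice_one_eq_iff (hs : List Char) (p : Nat) (c : Char) :
    PySem.List.slice hs (some (p : Int)) (some ((p : Int) + 1)) = [c] ↔ hs[p]? = some c := by
  have h1 : ((p : Int) + 1) = ((p + 1 : Nat) : Int) := by push_cast; ring
  rw [h1, PySem.List.slice_natCast, show p + 1 - p = 1 by omega, List.take_one, List.head?_drop]
  cases hs[p]? <;> simp

-- while header[position:position+1] == " ": position += 1
def skipA (hs : List Char) (p : Nat) : Nat :=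
  if h : PySem.List.slice hs (some (p : Int)) (some ((p : Int) + 1)) = [' '] then
    skipA hs (p + 1)
  else p
  termination_by hs.length - p
  decreasing_by
    have := (List.getElem?_eq_some_iff.mp ((pvA_slice_one_eq_iff hs p ' ').mp h)).1
    omega

-- the quoted-value while loop; `none` = the IndexError the Python catches (break without storing)
def qloopA (hs : List Char) (p : Nat) (value : List Char) : Option (List Char × Nat) :=
  match h : PySem.List.pyGet? hs (p : Int) with
  | none => none
  | some c =>
    if c ≠ '"' then
      if c = '\\' then
        match PySem.List.pyGet? hs ((p : Int) + 1) with
        | none => none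
        | some d => qloopA hs (p + 2) (value ++ [d])
      else qloopA hs (p + 1) (value ++ [c])
    else some (value, p + 1)
  termination_by hs.length - p
  decreasing_by
    · have := pvA_pyGet_lt hs p c h; omega
    · have := pvA_pyGet_lt hs p c h; omega

-- the `while 1` loop of A; fuel hs.length+2 always suffices (semicolon strictly grows)
def loopA (hs : List Char) : Nat → Nat → PySem.Dict String String → PySem.Dict String String
  | 0, _, opts => opts
  | fuel + 1, s, opts =>
    let eq := PySem.Chars.findFrom hs ['='] ((s : Int) + 1) none
    if eq = -1 then opts
    else
      let equal : Nat := eq.toNat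
      let option := String.ofList (PySem.Chars.strip (PySem.Chars.lower
        (PySem.List.slice hs (some ((s : Int) + 1)) (some eq))))
      let position := skipA hs (equal + 1)
      if PySem.List.slice hs (some (position : Int)) (some ((position : Int) + 1)) = ['"'] then
        match qloopA hs (position + 1) [] with
        | none => opts
        | some (value, p2) =>
          let p3 := skipA hs p2
          if p3 = hs.length then
            loopA hs fuel hs.length (opts.insert option (String.ofList value))
          else
            match PySem.List.pyGet? hs (p3 : Int) with
            | none => opts
            | some c =>
              if c = ';' then loopA hs fuel p3 (opts.insert option (String.ofList value))
              else opts
      else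
        let sc := PySem.Chars.findFrom hs [';'] (position : Int) none
        if sc = -1 then
          loopA hs fuel hs.length
            (opts.insert option (String.ofList (PySem.List.slice hs (some (position : Int)) none)))
        else
          loopA hs fuel sc.toNat
            (opts.insert option (String.ofList (PySem.List.slice hs (some (position : Int)) (some sc))))

def parse_options_header (header : String) : String × (List (String × String)) :=
  let hs := header.toList
  let f := PySem.Chars.find hs [';']
  let ct0 := if f = -1 then hs else PySem.List.slice hs (some 0) (some f)
  let sem := if f = -1 then hs.length else f.toNat
  let content_type := PySem.Chars.strip (PySem.Chars.lower ct0)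
  let opts := loopA hs (hs.length + 2) sem PySem.Dict.empty
  (String.ofList content_type, opts.items)

-- ===== PORT B =====

-- the six machine states of Source B
inductive PState
  | nm | pre | unq | quo | esc | afq
  deriving DecidableEq, Repr

-- the `for c in rest` fold of Source B, carrying (state, name, buf, options);
-- the trailing match on the empty list is Source B's after-the-loop finalisation
def runB : List Char → PState → String → List Char → PySem.Dict String String →
    PySem.Dict String String
  | [], st, nm, buf, opts =>
    match st with
    | .pre => opts.insert nm (String.ofList buf)
    | .unq => opts.insert nm (String.ofList buf)
    | .afq => opts.insert nm (String.ofList buf)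
    | _ => opts
  | c :: rest, st, nm, buf, opts =>
    match st with
    | .nm =>
      if c = '=' then
        runB rest .pre (String.ofList (PySem.Chars.strip (PySem.Chars.lower buf))) [] opts
      else runB rest .nm nm (buf ++ [c]) opts
    | .pre =>
      if c = ' ' then runB rest .pre nm buf opts
      else if c = '"' then runB rest .quo nm buf opts
      else if c = ';' then runB rest .nm nm [] (opts.insert nm "")
      else runB rest .unq nm [c] opts
    | .unq =>
      if c = ';' then runB rest .nm nm [] (opts.insert nm (String.ofList buf))
      else runB rest .unq nm (buf ++ [c]) opts
    | .quo =>
      if c = '"' then runB rest .afq nm buf opts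
      else if c = '\\' then runB rest .esc nm buf opts
      else runB rest .quo nm (buf ++ [c]) opts
    | .esc => runB rest .quo nm (buf ++ [c]) opts
    | .afq =>
      if c = ' ' then runB rest .afq nm buf opts
      else if c = ';' then runB rest .nm nm [] (opts.insert nm (String.ofList buf))
      else opts  -- junk after closing quote: early return, no store

def parse_options_header_alt (header : String) : String × (List (String × String)) :=
  let hs := header.toList
  let f := PySem.Chars.find hs [';']
  let ct0 := if f < 0 then hs else PySem.List.slice hs none (some f)
  let rest := if f < 0 then [] else PySem.List.slice hs (some (f + 1)) none
  let content_type := String.ofList (PySem.Chars.strip (PySem.Chars.lower ct0))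
  (content_type, (runB rest .nm "" [] PySem.Dict.empty).items)

-- ===== PRECONDITION & SPEC =====
def Spec_parse_options_header (header : String) (out : String × (List (String × String))) : Prop := out = parse_options_header_alt header
instance (header : String) (out : String × (List (String × String))) : Decidable (Spec_parse_options_header header out) := by unfold Spec_parse_options_header; infer_instance

-- ===== CLAIM (what is proved, stated in full; the proofs are below) =====
def Claim_equal_parse_options_header : Prop := ∀ (header : String), Dom_parse_options_header header → Spec_parse_options_header header (parse_options_header header)

-- ===== LEMMAS AND PROOFS =====

-- proof-only helpers: an index-based rendering of A's loop structure, the stepping stone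
-- between loopA and the state machine runB

-- first index j ≥ i with hs[j] = c, else the index where the scan stopped (≥ length)
def scanTo (hs : List Char) (c : Char) (i : Nat) : Nat :=
  match h : hs[i]? with
  | none => i
  | some d => if d = c then i else scanTo hs c (i + 1)
  termination_by hs.length - i
  decreasing_by
    have := (List.getElem?_eq_some_iff.mp h).1
    omega

def skipB (hs : List Char) (i : Nat) : Nat :=
  match h : hs[i]? with
  | none => i
  | some c => if c = ' ' then skipB hs (i + 1) else i
  termination_by hs.length - i
  decreasing_by
    have := (List.getElem?_eq_some_iff.mp h).1
    omega

def qloopB (hs : List Char) (i : Nat) (value : List Char) : Option (List Char × Nat) :=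
  match h : hs[i]? with
  | none => none
  | some c =>
    if c = '"' then some (value, i + 1)
    else if c = '\\' then
      match hs[i + 1]? with
      | none => none
      | some d => qloopB hs (i + 2) (value ++ [d])
    else qloopB hs (i + 1) (value ++ [c])
  termination_by hs.length - i
  decreasing_by
    · have := (List.getElem?_eq_some_iff.mp h).1
      omega
    · have := (List.getElem?_eq_some_iff.mp h).1
      omega

def loopB (hs : List Char) : Nat → Nat → PySem.Dict String String → PySem.Dict String String
  | 0, _, opts => opts
  | fuel + 1, i, opts =>
    let e := scanTo hs '=' i
    if e < hs.length then
      let option := String.ofList (PySem.Chars.strip (PySem.Chars.lower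
        (PySem.List.slice hs (some (i : Int)) (some (e : Int)))))
      let j := skipB hs (e + 1)
      if hs[j]? = some '"' then
        match qloopB hs (j + 1) [] with
        | none => opts
        | some (value, j2) =>
          let j3 := skipB hs j2
          if hs[j3]?.any (fun c => c != ';') then opts
          else loopB hs fuel (j3 + 1) (opts.insert option (String.ofList value))
      else
        let k := scanTo hs ';' j
        loopB hs fuel (k + 1)
          (opts.insert option (String.ofList (PySem.List.slice hs (some (j : Int)) (some (k : Int)))))
    else opts

theorem scanTo_ge (hs : List Char) (c : Char) (i : Nat) : i ≤ scanTo hs c i := by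
  fun_induction scanTo <;> omega

theorem scanTo_le (hs : List Char) (c : Char) (i : Nat) (hi : i ≤ hs.length) :
    scanTo hs c i ≤ hs.length := by
  fun_induction scanTo with
  | case1 i h => exact hi
  | case2 i h => exact hi
  | case3 i d h hd ih => exact ih (by have := (List.getElem?_eq_some_iff.mp h).1; omega)

theorem scanTo_of_ge (hs : List Char) (c : Char) (i : Nat) (hi : hs.length ≤ i) :
    scanTo hs c i = i := by
  rw [scanTo, List.getElem?_eq_none hi]

theorem scanTo_getElem? (hs : List Char) (c : Char) (i : Nat)
    (hlt : scanTo hs c i < hs.length) : hs[scanTo hs c i]? = some c := by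
  fun_induction scanTo with
  | case1 i h => exact absurd (List.getElem?_eq_none_iff.mp h) (by omega)
  | case2 i h => exact h
  | case3 i d h hd ih => exact ih hlt

theorem scanTo_min (hs : List Char) (c : Char) (i : Nat) :
    ∀ k, i ≤ k → k < scanTo hs c i → hs[k]? ≠ some c := by
  fun_induction scanTo with
  | case1 i h => intro k h1 h2; exact absurd h1 (by omega)
  | case2 i h => intro k h1 h2; exact absurd h1 (by omega)
  | case3 i d h hd ih =>
    intro k h1 h2
    rcases eq_or_lt_of_le h1 with rfl | h1'
    · rw [h]; simp [hd]
    · exact ih k h1' h2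

theorem scanTo_hit (hs : List Char) (c : Char) (i : Nat) (h : hs[i]? = some c) :
    scanTo hs c i = i := by
  rw [scanTo, h]; simp

theorem scanTo_step (hs : List Char) (c d : Char) (i : Nat) (h : hs[i]? = some d)
    (hd : d ≠ c) : scanTo hs c i = scanTo hs c (i + 1) := by
  rw [scanTo, h]; simp [hd]

theorem skipB_ge (hs : List Char) (i : Nat) : i ≤ skipB hs i := by
  fun_induction skipB <;> omega

theorem skipB_le (hs : List Char) (i : Nat) (hi : i ≤ hs.length) : skipB hs i ≤ hs.length := by
  fun_induction skipB with
  | case1 i h => exact hi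
  | case2 i h ih => exact ih (by have := (List.getElem?_eq_some_iff.mp h).1; omega)
  | case3 i c h hc => exact hi

-- the bridge: header.find(c, i) versus the forward scan
theorem findFrom_eq_scanTo (hs : List Char) (c : Char) (i : Nat) (hi : i ≤ hs.length) :
    PySem.Chars.findFrom hs [c] (i : Int) none =
      if scanTo hs c i < hs.length then ((scanTo hs c i : Nat) : Int) else -1 := by
  by_cases hlt : scanTo hs c i < hs.length
  · rw [if_pos hlt]
    set e := scanTo hs c i with he
    have h1 : hs[e]? = some c := scanTo_getElem? hs c i hlt
    have hge : i ≤ e := scanTo_ge hs c i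
    have hinf : [c] <:+: hs.drop i := by
      rw [List.singleton_infix_iff]
      have h2 : (hs.drop i)[e - i]? = some c := by
        rw [List.getElem?_drop, Nat.add_sub_cancel' hge]; exact h1
      exact List.mem_of_getElem? h2
    have hne : PySem.Chars.findFrom hs [c] (i : Int) none ≠ -1 := by
      rw [Ne, PySem.Chars.findFrom_natCast_eq_neg_one_iff hs [c] i hi]
      simpa using hinf
    obtain ⟨hile, hpre, hmin⟩ := PySem.Chars.findFrom_natCast_spec hs [c] i hi hne
    set f := PySem.Chars.findFrom hs [c] (i : Int) none with hf
    have hf0 : (0 : Int) ≤ f := le_trans (by positivity) hile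
    have hfc : hs[f.toNat]? = some c := by
      obtain ⟨t, ht⟩ := hpre
      rw [← List.head?_drop, ← ht]; rfl
    have hfl : f.toNat < hs.length := (List.getElem?_eq_some_iff.mp hfc).1
    have hif : i ≤ f.toNat := by omega
    have hle1 : e ≤ f.toNat := by
      by_contra hcon
      exact scanTo_min hs c i f.toNat hif (by omega) hfc
    have hle2 : f.toNat ≤ e := by
      by_contra hcon
      refine hmin e hge (by omega) ?_
      have hdc : hs.drop e = c :: (hs.drop (e + 1)) := by
        rw [List.drop_eq_getElem_cons (by omega : e < hs.length)]
        have : hs[e] = c := by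
          have h3 := h1; rw [List.getElem?_eq_some_iff] at h3; exact h3.2
        rw [this]
      exact ⟨hs.drop (e + 1), hdc.symm⟩
    omega
  · rw [if_neg hlt]
    have he : scanTo hs c i = hs.length := le_antisymm (scanTo_le hs c i hi) (by omega)
    rw [PySem.Chars.findFrom_natCast_eq_neg_one_iff hs [c] i hi]
    intro hinf
    rw [List.singleton_infix_iff] at hinf
    obtain ⟨m, hm⟩ := List.getElem?_of_mem hinf
    rw [List.getElem?_drop] at hm
    have hml : i + m < hs.length := (List.getElem?_eq_some_iff.mp hm).1
    exact scanTo_min hs c i (i + m) (by omega) (by omega) hm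

-- header.find(sub, start) with start past the end is -1
theorem findFrom_gt (hs : List Char) (sub : List Char) (st : Int)
    (h : (hs.length : Int) < st) : PySem.Chars.findFrom hs sub st none = -1 := by
  simp only [PySem.Chars.findFrom]
  rw [if_neg (by omega : ¬ st < 0)]
  rw [if_pos (by omega : (hs.length : Int) < st)]

-- header[a:] = header[a:len(header)]
theorem slice_some_none (hs : List Char) (a : Option Int) :
    PySem.List.slice hs a none = PySem.List.slice hs a (some (hs.length : Int)) := by
  simp only [PySem.List.slice, PySem.List.clampIdx]
  rw [if_neg (by omega : ¬ (hs.length : Int) < 0)]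
  simp

theorem skipA_eq_skipB (hs : List Char) (p : Nat) : skipA hs p = skipB hs p := by
  fun_induction skipA with
  | case1 p h ih =>
    rw [skipB, ih]
    have hp := (pvA_slice_one_eq_iff hs p ' ').mp h
    split
    · next hn => rw [hp] at hn; cases hn
    · next c hc => rw [hp] at hc; cases hc; simp
  | case2 p h =>
    rw [skipB]
    rw [pvA_slice_one_eq_iff] at h
    split
    · rfl
    · next c hc => rw [hc] at h; simp at h; simp [h]

theorem qloopA_eq_qloopB (hs : List Char) (p : Nat) (v : List Char) :
    qloopA hs p v = qloopB hs p v := by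
  fun_induction qloopA with
  | case1 p v h =>
    rw [PySem.List.pyGet?_natCast] at h
    rw [qloopB, h]
  | case2 p v h2 h1 _ =>
    rw [PySem.List.pyGet?_natCast] at h1
    rw [show ((p : Int) + 1) = ((p + 1 : Nat) : Int) by push_cast; ring,
      PySem.List.pyGet?_natCast] at h2
    rw [qloopB, h1]
    simp [h2]
  | case3 p v d h2 h1 _ ih =>
    rw [PySem.List.pyGet?_natCast] at h1
    rw [show ((p : Int) + 1) = ((p + 1 : Nat) : Int) by push_cast; ring,
      PySem.List.pyGet?_natCast] at h2
    rw [qloopB, h1]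
    simp only [h2]
    simpa using ih
  | case4 p v c h1 hq hb ih =>
    rw [PySem.List.pyGet?_natCast] at h1
    rw [qloopB, h1]
    simp only [if_neg (by simpa using hq), if_neg hb]
    exact ih
  | case5 p v c h1 hq =>
    rw [PySem.List.pyGet?_natCast] at h1
    rw [qloopB, h1]
    simp at hq
    simp [hq]

theorem qloopB_le (hs : List Char) (i : Nat) (v : List Char) :
    ∀ val j, qloopB hs i v = some (val, j) → j ≤ hs.length := by
  fun_induction qloopB with
  | case1 i v h => intro val j hj; cases hj
  | case2 i v h =>
    intro val j hj
    cases hj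
    exact (List.getElem?_eq_some_iff.mp h).1
  | case3 i v h2 h1 hb => intro val j hj; cases hj
  | case4 i v d h2 h1 hb ih => exact ih
  | case5 i v c h hq hb ih => exact ih

theorem qloopB_ge (hs : List Char) (i : Nat) (v : List Char) :
    ∀ val j, qloopB hs i v = some (val, j) → i < j := by
  fun_induction qloopB with
  | case1 i v h => intro val j hj; cases hj
  | case2 i v h => intro val j hj; cases hj; omega
  | case3 i v h2 h1 hb => intro val j hj; cases hj
  | case4 i v d h2 h1 hb ih => intro val j hj; have := ih val j hj; omega
  | case5 i v c h hq hb ih => intro val j hj; have := ih val j hj; omega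

theorem loop_eq (hs : List Char) :
    ∀ fuel s opts, s ≤ hs.length → loopA hs fuel s opts = loopB hs fuel (s + 1) opts := by
  intro fuel
  induction fuel with
  | zero => intro s opts _; rfl
  | succ fuel ih =>
    intro s opts hsle
    rcases eq_or_lt_of_le hsle with rfl | hslt
    · -- s = length: '=' search starts past the end on both sides
      have hA : PySem.Chars.findFrom hs ['='] ((hs.length : Int) + 1) none = -1 :=
        findFrom_gt hs ['='] _ (by omega)
      have hB : scanTo hs '=' (hs.length + 1) = hs.length + 1 :=
        scanTo_of_ge hs '=' _ (by omega)
      simp [loopA, loopB, hA, hB]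
    · -- s < length
      rw [loopA, loopB]
      rw [show ((s : Int) + 1) = ((s + 1 : Nat) : Int) by push_cast; ring]
      rw [findFrom_eq_scanTo hs '=' (s + 1) (by omega)]
      set e := scanTo hs '=' (s + 1) with hee
      by_cases hel : e < hs.length
      · rw [if_pos hel, if_pos hel, if_neg (by omega : ¬ ((e : Nat) : Int) = -1)]
        simp only [Int.toNat_natCast]
        rw [skipA_eq_skipB]
        set j := skipB hs (e + 1) with hj
        have hjle : j ≤ hs.length := skipB_le hs (e + 1) (by omega)
        simp only [pvA_slice_one_eq_iff hs j '"']
        by_cases hq : hs[j]? = some '"'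
        · rw [if_pos hq, if_pos hq, qloopA_eq_qloopB]
          cases hqc : qloopB hs (j + 1) [] with
          | none => rfl
          | some vp =>
            obtain ⟨value, j2⟩ := vp
            dsimp only
            have hj2 : j2 ≤ hs.length := qloopB_le hs (j + 1) [] value j2 hqc
            rw [skipA_eq_skipB]
            set j3 := skipB hs j2 with hj3
            have hj3le : j3 ≤ hs.length := skipB_le hs j2 hj2
            rcases eq_or_lt_of_le hj3le with heq | hlt3
            · rw [if_pos heq]
              have hnone : hs[j3]? = none := List.getElem?_eq_none (by omega)
              rw [hnone]
              simp only [Option.any_none, Bool.false_eq_true, if_false]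
              rw [heq, ih hs.length _ le_rfl]
            · rw [if_neg (by omega)]
              have hsome : hs[j3]? = some hs[j3] := List.getElem?_eq_getElem hlt3
              rw [PySem.List.pyGet?_natCast, hsome]
              simp only [Option.any_some]
              by_cases hc : hs[j3] = ';'
              · rw [if_pos hc]
                simp only [hc, bne_self_eq_false, Bool.false_eq_true, if_false]
                exact ih j3 _ (by omega)
              · rw [if_neg hc]
                simp only [if_pos (by simpa using hc : (hs[j3] != ';') = true)]
        · rw [if_neg hq, if_neg hq]
          rw [findFrom_eq_scanTo hs ';' j hjle]
          set k := scanTo hs ';' j with hk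
          have hkle : k ≤ hs.length := scanTo_le hs ';' j hjle
          by_cases hkl : k < hs.length
          · rw [if_pos hkl, if_neg (by omega : ¬ ((k : Nat) : Int) = -1)]
            simp only [Int.toNat_natCast]
            exact ih k _ (by omega)
          · rw [if_neg hkl, if_pos rfl]
            have hkeq : k = hs.length := by omega
            rw [slice_some_none, hkeq]
            exact ih hs.length _ le_rfl
      · rw [if_neg hel, if_neg hel, if_pos rfl]

-- ==== segment lemmas: each machine state run, read off hs.drop i ====

theorem runB_name (hs : List Char) (i : Nat) (nm : String) (buf : List Char)
    (opts : PySem.Dict String String) :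
    runB (hs.drop i) .nm nm buf opts =
      if scanTo hs '=' i < hs.length then
        runB (hs.drop (scanTo hs '=' i + 1)) .pre
          (String.ofList (PySem.Chars.strip (PySem.Chars.lower
            (buf ++ (hs.drop i).take (scanTo hs '=' i - i))))) [] opts
      else opts := by
  fun_induction scanTo hs '=' i generalizing buf with
  | case1 i h =>
    have hlen : hs.length ≤ i := List.getElem?_eq_none_iff.mp h
    rw [List.drop_eq_nil_of_le hlen, if_neg (by omega)]
    rfl
  | case2 i h =>
    have hlt := (List.getElem?_eq_some_iff.mp h).1
    have hc := (List.getElem?_eq_some_iff.mp h).2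
    rw [List.drop_eq_getElem_cons hlt, hc, if_pos hlt]
    simp [runB]
  | case3 i d h hd ih =>
    have hlt := (List.getElem?_eq_some_iff.mp h).1
    have hc := (List.getElem?_eq_some_iff.mp h).2
    have hge : i + 1 ≤ scanTo hs '=' (i + 1) := scanTo_ge hs '=' (i + 1)
    rw [List.drop_eq_getElem_cons hlt, hc]
    show runB (d :: hs.drop (i + 1)) .nm nm buf opts = _
    rw [runB, if_neg hd, ih (buf ++ [d])]
    rw [show scanTo hs '=' (i + 1) - i = (scanTo hs '=' (i + 1) - (i + 1)) + 1 by omega,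
      List.take_succ_cons, List.append_assoc]
    rfl

theorem runB_pre (hs : List Char) (i : Nat) (nm : String) (buf : List Char)
    (opts : PySem.Dict String String) :
    runB (hs.drop i) .pre nm buf opts =
      (match hs[skipB hs i]? with
       | none => opts.insert nm (String.ofList buf)
       | some c =>
         if c = '"' then runB (hs.drop (skipB hs i + 1)) .quo nm buf opts
         else if c = ';' then runB (hs.drop (skipB hs i + 1)) .nm nm [] (opts.insert nm "")
         else runB (hs.drop (skipB hs i + 1)) .unq nm [c] opts) := by
  fun_induction skipB hs i with
  | case1 i h =>
    have hlen : hs.length ≤ i := List.getElem?_eq_none_iff.mp h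
    rw [List.drop_eq_nil_of_le hlen, h]
    rfl
  | case2 i h ih =>
    have hlt := (List.getElem?_eq_some_iff.mp h).1
    have hc := (List.getElem?_eq_some_iff.mp h).2
    rw [List.drop_eq_getElem_cons hlt, hc]
    show runB (' ' :: hs.drop (i + 1)) .pre nm buf opts = _
    rw [runB, if_pos rfl]
    exact ih
  | case3 i c h hc =>
    have hlt := (List.getElem?_eq_some_iff.mp h).1
    have hce := (List.getElem?_eq_some_iff.mp h).2
    rw [List.drop_eq_getElem_cons hlt, hce, h]
    show runB (c :: hs.drop (i + 1)) .pre nm buf opts = _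
    rw [runB, if_neg hc]

theorem runB_quo (hs : List Char) (i : Nat) (nm : String) (buf : List Char)
    (opts : PySem.Dict String String) :
    runB (hs.drop i) .quo nm buf opts =
      (match qloopB hs i buf with
       | none => opts
       | some (val, j) => runB (hs.drop j) .afq nm val opts) := by
  fun_induction qloopB hs i buf with
  | case1 i v h =>
    have hlen : hs.length ≤ i := List.getElem?_eq_none_iff.mp h
    rw [List.drop_eq_nil_of_le hlen]
    rfl
  | case2 i v h =>
    have hlt := (List.getElem?_eq_some_iff.mp h).1
    have hc := (List.getElem?_eq_some_iff.mp h).2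
    rw [List.drop_eq_getElem_cons hlt, hc]
    show runB ('"' :: hs.drop (i + 1)) .quo nm v opts = _
    rw [runB, if_pos rfl]
  | case3 i v h2 h1 hb =>
    have hlt := (List.getElem?_eq_some_iff.mp h1).1
    have hc := (List.getElem?_eq_some_iff.mp h1).2
    have hlen2 : hs.length ≤ i + 1 := List.getElem?_eq_none_iff.mp h2
    rw [List.drop_eq_getElem_cons hlt, hc, List.drop_eq_nil_of_le hlen2]
    show runB ('\\' :: []) .quo nm v opts = _
    rw [runB, if_neg (by decide), if_pos rfl]
    rfl
  | case4 i v d h2 h1 hb ih =>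
    have hlt := (List.getElem?_eq_some_iff.mp h1).1
    have hc := (List.getElem?_eq_some_iff.mp h1).2
    have hlt2 := (List.getElem?_eq_some_iff.mp h2).1
    have hc2 := (List.getElem?_eq_some_iff.mp h2).2
    rw [List.drop_eq_getElem_cons hlt, hc, List.drop_eq_getElem_cons hlt2, hc2]
    show runB ('\\' :: d :: hs.drop (i + 2)) .quo nm v opts = _
    rw [runB, if_neg (by decide), if_pos rfl, runB]
    exact ih
  | case5 i v c h hq hb ih =>
    have hlt := (List.getElem?_eq_some_iff.mp h).1
    have hc := (List.getElem?_eq_some_iff.mp h).2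
    rw [List.drop_eq_getElem_cons hlt, hc]
    show runB (c :: hs.drop (i + 1)) .quo nm v opts = _
    rw [runB, if_neg hq, if_neg hb]
    exact ih

theorem runB_afq (hs : List Char) (i : Nat) (nm : String) (buf : List Char)
    (opts : PySem.Dict String String) :
    runB (hs.drop i) .afq nm buf opts =
      (match hs[skipB hs i]? with
       | none => opts.insert nm (String.ofList buf)
       | some c =>
         if c = ';' then
           runB (hs.drop (skipB hs i + 1)) .nm nm [] (opts.insert nm (String.ofList buf))
         else opts) := by
  fun_induction skipB hs i with
  | case1 i h =>
    have hlen : hs.length ≤ i := List.getElem?_eq_none_iff.mp h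
    rw [List.drop_eq_nil_of_le hlen, h]
    rfl
  | case2 i h ih =>
    have hlt := (List.getElem?_eq_some_iff.mp h).1
    have hc := (List.getElem?_eq_some_iff.mp h).2
    rw [List.drop_eq_getElem_cons hlt, hc]
    show runB (' ' :: hs.drop (i + 1)) .afq nm buf opts = _
    rw [runB, if_pos rfl]
    exact ih
  | case3 i c h hc =>
    have hlt := (List.getElem?_eq_some_iff.mp h).1
    have hce := (List.getElem?_eq_some_iff.mp h).2
    rw [List.drop_eq_getElem_cons hlt, hce, h]
    show runB (c :: hs.drop (i + 1)) .afq nm buf opts = _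
    rw [runB, if_neg hc]

theorem runB_unq (hs : List Char) (i : Nat) (nm : String) (buf : List Char)
    (opts : PySem.Dict String String) :
    runB (hs.drop i) .unq nm buf opts =
      if scanTo hs ';' i < hs.length then
        runB (hs.drop (scanTo hs ';' i + 1)) .nm nm []
          (opts.insert nm (String.ofList (buf ++ (hs.drop i).take (scanTo hs ';' i - i))))
      else opts.insert nm (String.ofList (buf ++ (hs.drop i).take (scanTo hs ';' i - i))) := by
  fun_induction scanTo hs ';' i generalizing buf with
  | case1 i h =>
    have hlen : hs.length ≤ i := List.getElem?_eq_none_iff.mp h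
    rw [List.drop_eq_nil_of_le hlen, if_neg (by omega)]
    simp [runB]
  | case2 i h =>
    have hlt := (List.getElem?_eq_some_iff.mp h).1
    have hc := (List.getElem?_eq_some_iff.mp h).2
    rw [List.drop_eq_getElem_cons hlt, hc, if_pos hlt]
    show runB (';' :: hs.drop (i + 1)) .unq nm buf opts = _
    rw [runB, if_pos rfl]
    simp
  | case3 i d h hd ih =>
    have hlt := (List.getElem?_eq_some_iff.mp h).1
    have hc := (List.getElem?_eq_some_iff.mp h).2
    have hge : i + 1 ≤ scanTo hs ';' (i + 1) := scanTo_ge hs ';' (i + 1)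
    rw [List.drop_eq_getElem_cons hlt, hc]
    show runB (d :: hs.drop (i + 1)) .unq nm buf opts = _
    rw [runB, if_neg hd, ih (buf ++ [d])]
    rw [show scanTo hs ';' (i + 1) - i = (scanTo hs ';' (i + 1) - (i + 1)) + 1 by omega,
      List.take_succ_cons, List.append_assoc]
    rfl

theorem loopB_eq_runB (hs : List Char) :
    ∀ fuel i nm opts, hs.length + 2 ≤ fuel + i →
      loopB hs fuel i opts = runB (hs.drop i) .nm nm [] opts := by
  intro fuel
  induction fuel with
  | zero =>
    intro i nm opts hle
    rw [List.drop_eq_nil_of_le (by omega)]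
    rfl
  | succ F ih =>
    intro i nm opts hle
    rw [loopB, runB_name]
    by_cases hel : scanTo hs '=' i < hs.length
    · have hie : i ≤ scanTo hs '=' i := scanTo_ge hs '=' i
      set e := scanTo hs '=' i with he
      rw [if_pos hel, if_pos hel, PySem.List.slice_natCast]
      simp only [List.nil_append]
      set nm0 := String.ofList (PySem.Chars.strip (PySem.Chars.lower
        (List.take (e - i) (List.drop i hs)))) with hnm0
      rw [runB_pre]
      set j := skipB hs (e + 1) with hj
      have hje : e + 1 ≤ j := skipB_ge hs (e + 1)
      have hjle : j ≤ hs.length := skipB_le hs (e + 1) (by omega)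
      cases hgj : hs[j]? with
      | none =>
        have hjlen : hs.length ≤ j := List.getElem?_eq_none_iff.mp hgj
        rw [if_neg (by simp : ¬ (none : Option Char) = some '"')]
        have hk : scanTo hs ';' j = j := scanTo_of_ge hs ';' j hjlen
        rw [hk, PySem.List.slice_natCast, Nat.sub_self, List.take_zero]
        rw [ih (j + 1) nm0 _ (by omega), List.drop_eq_nil_of_le (by omega)]
        rfl
      | some c =>
        simp only [Option.some.injEq]
        by_cases hcq : c = '"'
        · subst hcq
          rw [if_pos rfl, if_pos rfl, runB_quo]
          cases hql : qloopB hs (j + 1) [] with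
          | none => rfl
          | some vp =>
            obtain ⟨val, j2⟩ := vp
            have hj2le : j2 ≤ hs.length := qloopB_le hs (j + 1) [] val j2 hql
            have hj2ge : j + 1 < j2 := qloopB_ge hs (j + 1) [] val j2 hql
            dsimp only
            rw [runB_afq]
            set j3 := skipB hs j2 with hj3
            have h3ge : j2 ≤ j3 := skipB_ge hs j2
            have h3le : j3 ≤ hs.length := skipB_le hs j2 hj2le
            cases hg3 : hs[j3]? with
            | none =>
              have h3len : hs.length ≤ j3 := List.getElem?_eq_none_iff.mp hg3
              simp only [Option.any_none, Bool.false_eq_true, if_false]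
              rw [ih (j3 + 1) nm0 _ (by omega), List.drop_eq_nil_of_le (by omega)]
              rfl
            | some d =>
              simp only [Option.any_some]
              by_cases hd : d = ';'
              · subst hd
                simp only [bne_self_eq_false, Bool.false_eq_true, if_false]
                exact ih (j3 + 1) nm0 _ (by omega)
              · rw [if_pos (by simp [hd] : (d != ';') = true), if_neg hd]
        · rw [if_neg hcq, if_neg hcq]
          by_cases hcs : c = ';'
          · subst hcs
            have hk : scanTo hs ';' j = j := scanTo_hit hs ';' j hgj
            rw [if_pos rfl, hk, PySem.List.slice_natCast, Nat.sub_self, List.take_zero,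
              ih (j + 1) nm0 _ (by omega)]
          · rw [if_neg hcs]
            have hjlt : j < hs.length := (List.getElem?_eq_some_iff.mp hgj).1
            have hstep : scanTo hs ';' j = scanTo hs ';' (j + 1) :=
              scanTo_step hs ';' c j hgj hcs
            have hkge : j + 1 ≤ scanTo hs ';' (j + 1) := scanTo_ge hs ';' (j + 1)
            rw [hstep, runB_unq]
            have hsl : PySem.List.slice hs (some (j : Int))
                (some ((scanTo hs ';' (j + 1) : Nat) : Int)) =
                [c] ++ List.take (scanTo hs ';' (j + 1) - (j + 1)) (List.drop (j + 1) hs) := by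
              rw [PySem.List.slice_natCast, List.drop_eq_getElem_cons hjlt,
                (List.getElem?_eq_some_iff.mp hgj).2,
                show scanTo hs ';' (j + 1) - j = (scanTo hs ';' (j + 1) - (j + 1)) + 1 by omega,
                List.take_succ_cons]
              rfl
            rw [hsl]
            by_cases hkl : scanTo hs ';' (j + 1) < hs.length
            · rw [if_pos hkl, ih _ nm0 _ (by omega)]
            · rw [if_neg hkl, ih _ nm0 _ (by omega),
                List.drop_eq_nil_of_le (by omega)]
              rfl
    · rw [if_neg hel, if_neg hel]

-- header[0:b] = header[:b]
theorem slice_zero_eq_none (hs : List Char) (b : Option Int) :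
    PySem.List.slice hs (some 0) b = PySem.List.slice hs none b := by
  simp [PySem.List.slice, PySem.List.clampIdx]

-- ===== VERDICT (by name: the statement is the Claim_ definition above) =====
theorem parse_options_header_spec : Claim_equal_parse_options_header := by
  intro header _
  show parse_options_header header = parse_options_header_alt header
  rw [parse_options_header, parse_options_header_alt]
  set hs := header.toList with hhs
  set f := PySem.Chars.find hs [';'] with hfd
  have hfge : -1 ≤ f := PySem.Chars.neg_one_le_find hs [';']
  have hfle : f ≤ (hs.length : Int) := PySem.Chars.find_le_length hs [';']
  by_cases hf : f = -1
  · rw [if_pos hf, if_pos hf, if_pos (by omega : f < 0), if_pos (by omega : f < 0)]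
    rw [loop_eq hs (hs.length + 2) hs.length _ le_rfl,
      loopB_eq_runB hs (hs.length + 2) (hs.length + 1) "" _ (by omega),
      List.drop_eq_nil_of_le (by omega)]
  · rw [if_neg hf, if_neg hf, if_neg (by omega : ¬ f < 0), if_neg (by omega : ¬ f < 0)]
    have hfc : ((f.toNat : Nat) : Int) = f := by omega
    rw [slice_zero_eq_none]
    rw [PySem.List.slice_from hs (by omega : (0 : Int) ≤ f + 1),
      show (f + 1).toNat = f.toNat + 1 by omega]
    rw [loop_eq hs (hs.length + 2) f.toNat _ (by omega),
      loopB_eq_runB hs (hs.length + 2) (f.toNat + 1) "" _ (by omega)]
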